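-- pv_equiv track=rewrite | github.com/zhengyang-2002/HEAL | src/tools.py | optimize_contest_list
-- ===== SOURCE A (Python) =====
-- def optimize_contest_list(contest_list):
--     # 创建一个字典来存储每个模型对的实验
--     model_pair_dict = {}
--
--     # 遍历contest_list，将实验按照模型对分组
--     for entity in contest_list:
--         model_pair = tuple(sorted([entity['model_a'], entity['model_b']]))
--         if model_pair not in model_pair_dict:
--             model_pair_dict[model_pair] = []
--         model_pair_dict[model_pair].append(entity)
--
--     # 清空原始的contest_list
--     contest_list = []
--
--     # 将分组后的实验按照模型对的顺序重新排列
--     for model_pair, entities in model_pair_dict.items():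
--         contest_list.extend(entities)
--
--     return contest_list
-- ===== SOURCE B (Python) =====
-- def optimize_contest_list(contest_list):
--     # Assign each distinct unordered model pair the rank of its first appearance,
--     # then stably sort by that rank (no explicit per-group buckets).
--     rank = {}
--     for entity in contest_list:
--         model_pair = tuple(sorted([entity['model_a'], entity['model_b']]))
--         if model_pair not in rank:
--             rank[model_pair] = len(rank)
--     return sorted(contest_list,
--                   key=lambda e: rank[tuple(sorted([e['model_a'], e['model_b']]))])
-- ===== Notes on version B (the rewrite author's own statement) =====
-- stated objective: alternative
-- what changed: B replaces A's explicit per-pair bucket lists (dict of lists concatenated in key insertion order) by assigning each distinct unordered model pair its first-appearance rank and doing one stable sort of the original list by that rank.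
import Mathlib
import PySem

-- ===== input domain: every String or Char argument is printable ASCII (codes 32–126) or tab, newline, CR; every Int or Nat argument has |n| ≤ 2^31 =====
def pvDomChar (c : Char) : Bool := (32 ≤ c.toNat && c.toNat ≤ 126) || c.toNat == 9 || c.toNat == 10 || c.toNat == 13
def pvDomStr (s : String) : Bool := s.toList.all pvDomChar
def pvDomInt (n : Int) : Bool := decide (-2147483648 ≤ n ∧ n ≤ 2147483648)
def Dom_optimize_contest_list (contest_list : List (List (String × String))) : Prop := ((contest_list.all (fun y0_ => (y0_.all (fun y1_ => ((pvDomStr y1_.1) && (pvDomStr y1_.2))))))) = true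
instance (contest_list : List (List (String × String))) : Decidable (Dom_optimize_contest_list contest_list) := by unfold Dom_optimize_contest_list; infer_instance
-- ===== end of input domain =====

-- B replaces A's explicit per-pair buckets (dict of lists, then concatenation) by one
-- first-appearance rank per unordered model pair and a single stable sort by that rank
-- (objective: alternative decomposition, same asymptotic cost).

-- entity['model_a'] / entity['model_b']: first-match lookup in the entity dict
-- ("" can only occur off Pre_, where the Python raises KeyError)
def pvLookup (entity : List (String × String)) (k : String) : String :=
  (((entity.find? (fun p => p.1 == k)).map (fun p => p.2)).getD "")

-- tuple(sorted([entity['model_a'], entity['model_b']])), kept as a 2-element list key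
def pvPairKey (entity : List (String × String)) : List String :=
  PySem.List.sorted [pvLookup entity "model_a", pvLookup entity "model_b"] (fun x => x) false

-- ===== PORT A =====
def optimize_contest_list (contest_list : List (List (String × String))) : List (List (String × String)) :=
  -- for entity in contest_list: if pair not in dict: dict[pair] = []; dict[pair].append(entity)
  let model_pair_dict : PySem.Dict (List String) (List (List (String × String))) :=
    contest_list.foldl
      (fun d entity =>
        let model_pair := pvPairKey entity
        let d := if d.contains model_pair then d else d.insert model_pair []
        d.insert model_pair (d.getD model_pair [] ++ [entity]))
      PySem.Dict.empty
  -- for model_pair, entities in dict.items(): contest_list.extend(entities)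
  model_pair_dict.items.foldl (fun acc p => acc ++ p.2) []

-- ===== PORT B =====
def optimize_contest_list_alt (contest_list : List (List (String × String))) : List (List (String × String)) :=
  -- for entity in contest_list: if pair not in rank: rank[pair] = len(rank)
  let rank : PySem.Dict (List String) Int :=
    contest_list.foldl
      (fun r entity =>
        let model_pair := pvPairKey entity
        if r.contains model_pair then r else r.insert model_pair (r.size : Int))
      PySem.Dict.empty
  -- sorted(contest_list, key=lambda e: rank[pair(e)]) — stable sort
  PySem.List.sorted contest_list (fun e => rank.getD (pvPairKey e) 0) false

-- ===== PRECONDITION & SPEC =====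
-- Pre_: every entity dict carries both keys 'model_a' and 'model_b'; on any other input
-- the Python A (and B alike) raises KeyError.
def Pre_optimize_contest_list (contest_list : List (List (String × String))) : Prop :=
  (contest_list.all (fun e => (e.any (fun p => p.1 == "model_a")) && (e.any (fun p => p.1 == "model_b")))) = true
instance (contest_list : List (List (String × String))) : Decidable (Pre_optimize_contest_list contest_list) := by unfold Pre_optimize_contest_list; infer_instance
def pvWitness_optimize_contest_list : (List (List (String × String))) :=
  [[("model_a", "gpt"), ("model_b", "claude")], [("model_b", "gpt"), ("model_a", "claude")]]

def Spec_optimize_contest_list (contest_list : List (List (String × String))) (out : List (List (String × String))) : Prop := out = optimize_contest_list_alt contest_list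
instance (contest_list : List (List (String × String))) (out : List (List (String × String))) : Decidable (Spec_optimize_contest_list contest_list out) := by unfold Spec_optimize_contest_list; infer_instance

-- ===== CLAIM (what is proved, stated in full; the proofs are below) =====
def Claim_equal_optimize_contest_list : Prop := ∀ (contest_list : List (List (String × String))), Dom_optimize_contest_list contest_list → Pre_optimize_contest_list contest_list → Spec_optimize_contest_list contest_list (optimize_contest_list contest_list)

-- ===== LEMMAS AND PROOFS =====

-- the grouped normal form both programs compute: for each distinct pair key, in order of
-- first appearance, the entities with that key, in original order
def pvGroups (contest_list : List (List (String × String))) : List (List (String × String)) :=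
  (PySem.Set.ofList (contest_list.map pvPairKey)).flatMap
    (fun k => contest_list.filter (fun e => pvPairKey e == k))

-- A's loop body is dict[pair] = dict.get(pair, []) + [entity]
lemma stepA_eq (d : PySem.Dict (List String) (List (List (String × String))))
    (e : List (String × String)) :
    (let mp := pvPairKey e
     let d := if d.contains mp then d else d.insert mp []
     d.insert mp (d.getD mp [] ++ [e]))
    = d.modify (pvPairKey e) [] (fun v => v ++ [e]) := by
  show _ = d.insert (pvPairKey e) (d.getD (pvPairKey e) [] ++ [e])
  by_cases h : d.contains (pvPairKey e) = true
  · simp [h]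
  · simp only [Bool.not_eq_true] at h
    simp [h, PySem.Dict.getD_insert_self, PySem.Dict.insert_insert_self,
      PySem.Dict.getD_of_not_contains _ _ h]

lemma portA_eq_groups (cl : List (List (String × String))) :
    optimize_contest_list cl = pvGroups cl := by
  unfold optimize_contest_list pvGroups
  simp only [stepA_eq]
  set d := cl.foldl (fun d e => d.modify (pvPairKey e) [] (fun v => v ++ [e])) PySem.Dict.empty with hd
  have hkeys : d.keys = PySem.Set.ofList (cl.map pvPairKey) := by
    rw [hd, PySem.Dict.keys_foldl_modify_key cl pvPairKey [] (fun _ e v => v ++ [e])]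
    rfl
  have hnd : d.keys.Nodup := by rw [hkeys]; exact PySem.Set.nodup_ofList _
  have hgetD : ∀ c, d.getD c [] = cl.filter (fun e => pvPairKey e == c) := by
    intro c
    have := PySem.Dict.getD_foldl_modify_append (cl.map (fun e => (pvPairKey e, e))) PySem.Dict.empty c
    rw [List.foldl_map] at this
    simpa [List.filter_map, Function.comp_def] using this
  rw [PySem.List.foldl_append_eq_flatMap, PySem.Dict.items_eq_map_keys d hnd [],
    List.flatMap_map]
  simp only [hgetD, hkeys]
  rfl

-- B's rank dict lists the distinct pair keys in first-appearance order, numbered 0,1,2,…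
lemma rank_items (cl : List (List (String × String))) :
    (cl.foldl (fun r e => if r.contains (pvPairKey e) then r
                          else r.insert (pvPairKey e) (r.size : Int)) PySem.Dict.empty).items
    = (PySem.Set.ofList (cl.map pvPairKey)).zipIdx.map (fun p => (p.1, (p.2 : Int))) := by
  induction cl using List.reverseRecOn with
  | nil => rfl
  | append_singleton l a ih =>
    rw [List.foldl_append, List.map_append, List.map_cons, List.map_nil]
    set d := l.foldl (fun r e => if r.contains (pvPairKey e) then r
                          else r.insert (pvPairKey e) (r.size : Int)) PySem.Dict.empty with hd
    set K := PySem.Set.ofList (l.map pvPairKey) with hK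
    have hkeys : d.keys = K := by
      show d.items.map Prod.fst = K
      rw [ih, List.map_map]
      exact List.zipIdx_map_fst 0 K
    have hofl : PySem.Set.ofList (l.map pvPairKey ++ [pvPairKey a])
        = PySem.Set.add K (pvPairKey a) := by
      rw [hK, PySem.Set.ofList_eq_foldl, PySem.Set.ofList_eq_foldl, List.foldl_append]
      rfl
    rw [hofl]
    by_cases hc : d.contains (pvPairKey a) = true
    · have hmem : pvPairKey a ∈ K := by
        rw [← hkeys]; exact (PySem.Dict.contains_iff_mem_keys d _).mp hc
      simp only [List.foldl_cons, List.foldl_nil, hc, if_true]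
      rw [PySem.Set.add_of_mem hmem]
      exact ih
    · simp only [Bool.not_eq_true] at hc
      have hmem : pvPairKey a ∉ K := by
        rw [← hkeys]; intro hm
        rw [(PySem.Dict.contains_iff_mem_keys d _).mpr hm] at hc; cases hc
      have hsize : d.size = K.length := by
        show d.items.length = K.length
        rw [ih]; simp
      simp only [List.foldl_cons, List.foldl_nil, hc, if_false, Bool.false_eq_true]
      rw [PySem.Dict.items_insert_of_not_contains d _ hc, ih, PySem.Set.add_of_not_mem hmem,
        List.zipIdx_append]
      simp [hsize]

-- hence rank[pair(e)] is the index of pair(e) among the distinct pair keys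
lemma rank_getD (cl : List (List (String × String))) (e : List (String × String))
    (he : pvPairKey e ∈ PySem.Set.ofList (cl.map pvPairKey)) :
    (cl.foldl (fun r e => if r.contains (pvPairKey e) then r
                          else r.insert (pvPairKey e) (r.size : Int)) PySem.Dict.empty).getD
      (pvPairKey e) 0
    = (((PySem.Set.ofList (cl.map pvPairKey)).idxOf (pvPairKey e) : Nat) : Int) := by
  set K := PySem.Set.ofList (cl.map pvPairKey) with hK
  set d := cl.foldl (fun r e => if r.contains (pvPairKey e) then r
                          else r.insert (pvPairKey e) (r.size : Int)) PySem.Dict.empty with hd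
  have hitems := rank_items cl
  have hkeys : d.keys = K := by
    show d.items.map Prod.fst = K
    rw [hitems, List.map_map]
    exact List.zipIdx_map_fst 0 K
  have hnd : d.keys.Nodup := by rw [hkeys]; exact PySem.Set.nodup_ofList _
  have hj : K.idxOf (pvPairKey e) < K.length := List.idxOf_lt_length_of_mem he
  have hKj : K[K.idxOf (pvPairKey e)] = pvPairKey e := List.getElem_idxOf hj
  have hzmem : (pvPairKey e, K.idxOf (pvPairKey e)) ∈ K.zipIdx := by
    have := List.getElem_mem (l := K.zipIdx) (n := K.idxOf (pvPairKey e))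
      (by simpa using hj)
    simpa [List.getElem_zipIdx, hKj] using this
  have hmemitems : (pvPairKey e, ((K.idxOf (pvPairKey e) : Nat) : Int)) ∈ d.items := by
    rw [hitems]
    exact List.mem_map.mpr ⟨_, hzmem, rfl⟩
  exact PySem.Dict.getD_of_mem_items d hmemitems hnd 0

-- insertion of x into L ++ R lands exactly between them when x must go after all of L
-- and before all of R
lemma insertBy_split {α : Type} (before : α → α → Bool) (x : α) (L R : List α)
    (hL : ∀ y ∈ L, before x y = false) (hR : ∀ y ∈ R, before x y = true) :
    PySem.List.insertBy before x (L ++ R) = L ++ x :: R := by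
  induction L with
  | nil =>
    cases R with
    | nil => rfl
    | cons y ys => simp [PySem.List.insertBy, hR y (by simp)]
  | cons z L ih =>
    simp only [List.cons_append, PySem.List.insertBy, hL z (by simp), Bool.false_eq_true,
      if_false]
    rw [ih (fun y hy => hL y (by simp [hy]))]

-- the stable sort by first-appearance index of the pair key IS the grouped normal form
lemma stable_group (K : List (List String)) (hnd : K.Nodup)
    (rk : List (String × String) → Int) (cl : List (List (String × String)))
    (hin : ∀ e ∈ cl, pvPairKey e ∈ K)
    (hrk : ∀ e ∈ cl, rk e = ((K.idxOf (pvPairKey e) : Nat) : Int)) :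
    PySem.List.sorted cl rk false
      = K.flatMap (fun k => cl.filter (fun e => pvPairKey e == k)) := by
  induction cl using List.reverseRecOn with
  | nil => rw [PySem.List.sorted_eq_foldl_insertBy]; simp
  | append_singleton p x ih =>
    have hx : pvPairKey x ∈ K := hin x (by simp)
    have hin' : ∀ e ∈ p, pvPairKey e ∈ K := fun e he => hin e (by simp [he])
    have hrk' : ∀ e ∈ p, rk e = ((K.idxOf (pvPairKey e) : Nat) : Int) :=
      fun e he => hrk e (by simp [he])
    set i := K.idxOf (pvPairKey x) with hi
    have hilt : i < K.length := List.idxOf_lt_length_of_mem hx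
    have hKi : K[i] = pvPairKey x := List.getElem_idxOf hilt
    have hsplit : K.take i ++ K[i] :: K.drop (i + 1) = K := by
      rw [List.getElem_cons_drop]; exact List.take_append_drop i K
    have hidx : ∀ j (hj : j < K.length), K.idxOf K[j] = j :=
      fun j hj => List.Nodup.idxOf_getElem hnd j hj
    have hrank_le : ∀ y ∈ (K.take i).flatMap
        (fun k => p.filter (fun e => pvPairKey e == k)), rk y < i := by
      intro y hy
      obtain ⟨k, hk, hyf⟩ := List.mem_flatMap.mp hy
      obtain ⟨hyp, hpk⟩ := List.mem_filter.mp hyf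
      obtain ⟨j, hj, hjk⟩ := List.getElem_of_mem hk
      have hjlt : j < i := lt_of_lt_of_le hj (by simp [List.length_take])
      have hjK : j < K.length := lt_trans hjlt hilt
      have : K[j] = k := by simpa [List.getElem_take] using hjk
      have hky : pvPairKey y = k := by simpa using hpk
      have : rk y = (j : Int) := by
        rw [hrk' y hyp, hky, ← this, hidx j hjK]
      omega
    have hrank_mid : ∀ y ∈ p.filter (fun e => pvPairKey e == K[i]), rk y = (i : Int) := by
      intro y hy
      obtain ⟨hyp, hpk⟩ := List.mem_filter.mp hy
      have hky : pvPairKey y = K[i] := by simpa using hpk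
      rw [hrk' y hyp, hky, hidx i hilt]
    have hrank_gt : ∀ y ∈ (K.drop (i + 1)).flatMap
        (fun k => p.filter (fun e => pvPairKey e == k)), (i : Int) < rk y := by
      intro y hy
      obtain ⟨k, hk, hyf⟩ := List.mem_flatMap.mp hy
      obtain ⟨hyp, hpk⟩ := List.mem_filter.mp hyf
      obtain ⟨j, hj, hjk⟩ := List.getElem_of_mem hk
      have hjK : i + 1 + j < K.length := by
        have := hj; simp [List.length_drop] at this; omega
      have hKjk : K[i + 1 + j] = k := by
        rw [← hjk]; simp [List.getElem_drop]
      have hky : pvPairKey y = k := by simpa using hpk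
      have : rk y = ((i + 1 + j : Nat) : Int) := by
        rw [hrk' y hyp, hky, ← hKjk, hidx _ hjK]
      omega
    have hrkx : rk x = (i : Int) := by rw [hrk x (by simp)]
    rw [PySem.List.sorted_eq_foldl_insertBy, List.foldl_append, List.foldl_cons,
      List.foldl_nil, ← PySem.List.sorted_eq_foldl_insertBy, ih hin' hrk']
    rw [← hsplit, List.flatMap_append, List.flatMap_cons, List.flatMap_append,
      List.flatMap_cons]
    rw [← List.append_assoc]
    rw [insertBy_split _ x _ _
      (by
        intro y hy
        rcases List.mem_append.mp hy with hyT | hyM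
        · have := hrank_le y hyT
          simp only [decide_eq_false_iff_not, not_lt, hrkx]; omega
        · have := hrank_mid y hyM
          simp only [decide_eq_false_iff_not, not_lt, hrkx]; omega)
      (by
        intro y hy
        have := hrank_gt y hy
        simp only [decide_eq_true_eq, hrkx]; omega)]
    have hTcong : ∀ k ∈ K.take i,
        (p ++ [x]).filter (fun e => pvPairKey e == k) = p.filter (fun e => pvPairKey e == k) := by
      intro k hk
      obtain ⟨j, hj, hjk⟩ := List.getElem_of_mem hk
      have hjlt : j < i := lt_of_lt_of_le hj (by simp [List.length_take])
      have hjK : j < K.length := lt_trans hjlt hilt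
      have hKjk : K[j] = k := by simpa [List.getElem_take] using hjk
      have hne : pvPairKey x ≠ k := by
        intro hcontra
        have hji : List.idxOf (pvPairKey x) K = j := by rw [hcontra, ← hKjk, hidx j hjK]
        omega
      rw [List.filter_append, List.filter_singleton]
      simp [beq_eq_false_iff_ne.mpr hne]
    have hDcong : ∀ k ∈ K.drop (i + 1),
        (p ++ [x]).filter (fun e => pvPairKey e == k) = p.filter (fun e => pvPairKey e == k) := by
      intro k hk
      obtain ⟨j, hj, hjk⟩ := List.getElem_of_mem hk
      have hjK : i + 1 + j < K.length := by
        have := hj; simp [List.length_drop] at this; omega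
      have hKjk : K[i + 1 + j] = k := by rw [← hjk]; simp [List.getElem_drop]
      have hne : pvPairKey x ≠ k := by
        intro hcontra
        have hji : List.idxOf (pvPairKey x) K = i + 1 + j := by rw [hcontra, ← hKjk, hidx _ hjK]
        omega
      rw [List.filter_append, List.filter_singleton]
      simp [beq_eq_false_iff_ne.mpr hne]
    have hMid : (p ++ [x]).filter (fun e => pvPairKey e == K[i])
        = p.filter (fun e => pvPairKey e == K[i]) ++ [x] := by
      rw [List.filter_append, List.filter_singleton]
      simp [hKi]
    rw [List.flatMap_congr hTcong, List.flatMap_congr hDcong, hMid]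
    simp [List.append_assoc]

lemma portB_eq_groups (cl : List (List (String × String))) :
    optimize_contest_list_alt cl = pvGroups cl := by
  unfold optimize_contest_list_alt pvGroups
  apply stable_group _ (PySem.Set.nodup_ofList _)
  · intro e he
    exact (PySem.Set.mem_ofList _ _).mpr (List.mem_map_of_mem he)
  · intro e he
    exact rank_getD cl e ((PySem.Set.mem_ofList _ _).mpr (List.mem_map_of_mem he))

-- ===== VERDICT (by name: the statement is the Claim_ definition above) =====
theorem optimize_contest_list_spec : Claim_equal_optimize_contest_list := by
  intro cl _ _
  unfold Spec_optimize_contest_list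
  rw [portA_eq_groups, portB_eq_groups]
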